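-- pv_equiv track=rewrite | github.com/HumbleUnicorn/Advent-of-Code | src/solutions/2023-py/aoc03.py | findGears
-- ===== SOURCE A (Python) =====
-- from collections import Counter
--
-- def findGears(parts, symbols):
--     gL = []
--     for sym in symbols:
--         c = 0
--         n = []
--         if sym[2] == '*':
--             for line in parts:
--                 cx = Counter(line[0]) & Counter(sym[0])
--                 cy = Counter(line[1]) & Counter(sym[1])
--                 if cx and cy:
--                     c += 1
--                     if c<= 2:
--                         n.append(line[2])
--             if c == 2:
--                 gL.append([n[0],n[1],n[0]*n[1]])
--     return(gL)
-- ===== SOURCE B (Python) =====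
-- def findGears(parts, symbols):
--     # Inverted index: x-coordinate -> indices of parts covering that x (built once);
--     # each '*' symbol looks up only its own x-cells and verifies y-overlap on the candidates.
--     byx = {}
--     for i, (xs, _ys, _v) in enumerate(parts):
--         for x in xs:
--             cell = byx.setdefault(x, [])
--             if not cell or cell[-1] != i:
--                 cell.append(i)
--     gears = []
--     for sx, sy, ch in symbols:
--         if ch == '*':
--             cand = set()
--             for x in sx:
--                 cand.update(byx.get(x, ()))
--             syset = set(sy)
--             hits = [i for i in sorted(cand) if not syset.isdisjoint(parts[i][1])]
--             if len(hits) == 2: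
--                 a, b = parts[hits[0]][2], parts[hits[1]][2]
--                 gears.append([a, b, a * b])
--     return gears
-- ===== Notes on version B (the rewrite author's own statement) =====
-- stated objective: alternative
-- what changed: B builds an inverted index (x-coordinate -> covering part indices) once and answers each '*' symbol by looking up its own x-cells and verifying y-overlap on the candidates, instead of A's rescan of every part per symbol with per-pair Counter intersections.
import Mathlib
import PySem

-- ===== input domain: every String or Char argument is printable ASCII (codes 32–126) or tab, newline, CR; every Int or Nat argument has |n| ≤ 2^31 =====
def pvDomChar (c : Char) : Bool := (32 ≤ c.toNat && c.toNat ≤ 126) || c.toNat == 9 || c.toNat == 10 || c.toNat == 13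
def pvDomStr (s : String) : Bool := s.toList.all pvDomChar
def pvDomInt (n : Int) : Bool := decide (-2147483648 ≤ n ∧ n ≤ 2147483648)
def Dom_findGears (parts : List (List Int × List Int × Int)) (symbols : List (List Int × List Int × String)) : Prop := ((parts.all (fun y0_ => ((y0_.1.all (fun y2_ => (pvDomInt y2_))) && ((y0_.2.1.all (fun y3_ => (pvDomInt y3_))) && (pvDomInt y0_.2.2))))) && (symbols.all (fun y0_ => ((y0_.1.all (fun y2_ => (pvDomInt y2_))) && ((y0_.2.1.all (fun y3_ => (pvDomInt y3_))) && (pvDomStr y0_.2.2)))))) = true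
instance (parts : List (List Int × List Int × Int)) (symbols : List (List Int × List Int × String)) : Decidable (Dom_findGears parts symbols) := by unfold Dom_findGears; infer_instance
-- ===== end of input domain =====

-- B replaces A's per-symbol rescan of all parts with an inverted index built once
-- (x-coordinate -> covering part indices); each '*' symbol looks up only its own x-cells
-- and verifies y-overlap on the candidates (objective: alternative algorithm).


-- ===== PORT A =====
-- Counter(a) & Counter(b)  (Counter.__and__: iterate self's items, keep min count if positive)
def counterAnd (a b : PySem.Dict Int Int) : PySem.Dict Int Int :=
  a.items.foldl
    (fun r kv =>
      let newcount := min kv.2 (b.getD kv.1 0)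
      if 0 < newcount then r.insert kv.1 newcount else r)
    PySem.Dict.empty

def findGears (parts : List (List Int × List Int × Int)) (symbols : List (List Int × List Int × String)) : List (List Int) :=
  symbols.foldl
    (fun gL sym =>
      if sym.2.2 == "*" then
        let st := parts.foldl
          (fun (st : Int × List Int) line =>
            let cx := counterAnd (PySem.Dict.counter line.1) (PySem.Dict.counter sym.1)
            let cy := counterAnd (PySem.Dict.counter line.2.1) (PySem.Dict.counter sym.2.1)
            if cx.size ≠ 0 ∧ cy.size ≠ 0 then
              let c := st.1 + 1
              (c, if c ≤ 2 then st.2 ++ [line.2.2] else st.2)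
            else st)
          ((0 : Int), ([] : List Int))
        if st.1 == 2 then
          -- n[0], n[1]: in range here since c == 2 means n got exactly two appends
          gL ++ [[PySem.List.pyGetD st.2 0 0, PySem.List.pyGetD st.2 1 0,
                  PySem.List.pyGetD st.2 0 0 * PySem.List.pyGetD st.2 1 0]]
        else gL
      else gL)
    []

-- ===== PORT B =====
-- cell = byx.setdefault(x, []);  if not cell or cell[-1] != i: cell.append(i)
def cellAdd (g : PySem.Dict Int (List Int)) (x i : Int) : PySem.Dict Int (List Int) :=
  let cell := g.getD x []
  if cell.getLast? == some i then g else g.insert x (cell ++ [i])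

def buildIdx (parts : List (List Int × List Int × Int)) : PySem.Dict Int (List Int) :=
  (PySem.List.enumerate parts).foldl
    (fun g il => il.2.1.foldl (fun g x => cellAdd g x il.1) g)
    PySem.Dict.empty

def findGears_alt (parts : List (List Int × List Int × Int)) (symbols : List (List Int × List Int × String)) : List (List Int) :=
  let byx := buildIdx parts
  symbols.foldl
    (fun gears sym =>
      if sym.2.2 == "*" then
        let cand : PySem.Set Int :=
          sym.1.foldl (fun c x => PySem.Set.update c (byx.getD x [])) PySem.Set.empty
        let syset : PySem.Set Int := PySem.Set.ofList sym.2.1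
        let hits := (PySem.List.sorted cand (fun z => z) false).filter
          (fun i => !(PySem.Set.isdisjoint syset (PySem.List.pyGetD parts i ([], [], 0)).2.1))
        if (hits.length : Int) == 2 then
          let a := (PySem.List.pyGetD parts (PySem.List.pyGetD hits 0 0) ([], [], 0)).2.2
          let b := (PySem.List.pyGetD parts (PySem.List.pyGetD hits 1 0) ([], [], 0)).2.2
          gears ++ [[a, b, a * b]]
        else gears
      else gears)
    []

-- ===== PRECONDITION & SPEC =====
def Spec_findGears (parts : List (List Int × List Int × Int)) (symbols : List (List Int × List Int × String)) (out : List (List Int)) : Prop := out = findGears_alt parts symbols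
instance (parts : List (List Int × List Int × Int)) (symbols : List (List Int × List Int × String)) (out : List (List Int)) : Decidable (Spec_findGears parts symbols out) := by unfold Spec_findGears; infer_instance

-- ===== CLAIM (what is proved, stated in full; the proofs are below) =====
def Claim_equal_findGears : Prop := ∀ (parts : List (List Int × List Int × Int)) (symbols : List (List Int × List Int × String)), Dom_findGears parts symbols → Spec_findGears parts symbols (findGears parts symbols)

-- ===== LEMMAS AND PROOFS =====

-- the Bool form of "line shares an x with sx and a y with sy"
def condB (sx sy : List Int) (line : List Int × List Int × Int) : Bool :=
  line.1.any (fun x => sx.contains x) && line.2.1.any (fun y => sy.contains y)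

-- A's inner-loop step, as in the port of A (rfl below)
def stepA (sym : List Int × List Int × String) (st : Int × List Int)
    (line : List Int × List Int × Int) : Int × List Int :=
  let cx := counterAnd (PySem.Dict.counter line.1) (PySem.Dict.counter sym.1)
  let cy := counterAnd (PySem.Dict.counter line.2.1) (PySem.Dict.counter sym.2.1)
  if cx.size ≠ 0 ∧ cy.size ≠ 0 then
    let c := st.1 + 1
    (c, if c ≤ 2 then st.2 ++ [line.2.2] else st.2)
  else st

lemma size_insert_ne_zero (d : PySem.Dict Int Int) (k v : Int) : (d.insert k v).size ≠ 0 := by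
  unfold PySem.Dict.insert PySem.Dict.size
  split
  · next h =>
    simp only [List.length_map]
    intro hlen
    rw [List.length_eq_zero_iff] at hlen
    rw [PySem.Dict.contains_eq_isSome_get?] at h
    simp [PySem.Dict.get?, hlen] at h
  · simp

lemma fold_and_preserve (l : List (Int × Int)) (b : PySem.Dict Int Int) (r : PySem.Dict Int Int)
    (h : r.size ≠ 0) :
    (l.foldl (fun r kv =>
      let newcount := min kv.2 (b.getD kv.1 0)
      if 0 < newcount then r.insert kv.1 newcount else r) r).size ≠ 0 := by
  induction l generalizing r with
  | nil => exact h
  | cons kv rest ih =>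
    simp only [List.foldl_cons]
    split
    · exact ih _ (size_insert_ne_zero _ _ _)
    · exact ih _ h

lemma fold_and_skip (l : List (Int × Int)) (b : PySem.Dict Int Int) (r : PySem.Dict Int Int)
    (h : ∀ kv ∈ l, ¬ 0 < min kv.2 (b.getD kv.1 0)) :
    (l.foldl (fun r kv =>
      let newcount := min kv.2 (b.getD kv.1 0)
      if 0 < newcount then r.insert kv.1 newcount else r) r) = r := by
  induction l generalizing r with
  | nil => rfl
  | cons kv rest ih =>
    simp only [List.foldl_cons]
    rw [if_neg (h kv (by simp))]
    exact ih _ (fun kv' hm => h kv' (by simp [hm]))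

lemma fold_and_hit (l : List (Int × Int)) (b : PySem.Dict Int Int) (r : PySem.Dict Int Int)
    (h : ∃ kv ∈ l, 0 < min kv.2 (b.getD kv.1 0)) :
    (l.foldl (fun r kv =>
      let newcount := min kv.2 (b.getD kv.1 0)
      if 0 < newcount then r.insert kv.1 newcount else r) r).size ≠ 0 := by
  induction l generalizing r with
  | nil => simp at h
  | cons kv rest ih =>
    simp only [List.foldl_cons]
    rcases h with ⟨kv', hmem, hpos⟩
    rcases List.mem_cons.mp hmem with heq | htail
    · subst heq
      rw [if_pos hpos]
      exact fold_and_preserve _ _ _ (size_insert_ne_zero _ _ _)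
    · split
      · exact fold_and_preserve _ _ _ (size_insert_ne_zero _ _ _)
      · exact ih _ ⟨kv', htail, hpos⟩

lemma counterAnd_size_iff (a b : List Int) :
    (counterAnd (PySem.Dict.counter a) (PySem.Dict.counter b)).size ≠ 0 ↔ ∃ x, x ∈ a ∧ x ∈ b := by
  unfold counterAnd
  constructor
  · intro h
    by_contra hno
    push Not at hno
    apply h
    rw [fold_and_skip]
    · rfl
    · intro kv hm
      rw [PySem.Dict.items_counter] at hm
      rcases List.mem_map.mp hm with ⟨k, hk, rfl⟩
      rw [PySem.Set.mem_ofList] at hk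
      simp only [PySem.Dict.getD_counter]
      have : k ∉ b := hno k hk
      simp [List.count_eq_zero_of_not_mem this]
  · rintro ⟨x, hxa, hxb⟩
    apply fold_and_hit
    refine ⟨(x, (a.count x : Int)), ?_, ?_⟩
    · rw [PySem.Dict.items_counter]
      exact List.mem_map.mpr ⟨x, PySem.Set.mem_ofList a x |>.mpr hxa, rfl⟩
    · simp only [PySem.Dict.getD_counter]
      have h1 : 0 < a.count x := List.count_pos_iff.mpr hxa
      have h2 : 0 < b.count x := List.count_pos_iff.mpr hxb
      exact lt_min (by exact_mod_cast h1) (by exact_mod_cast h2)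

lemma cond_iff (sym : List Int × List Int × String) (line : List Int × List Int × Int) :
    ((counterAnd (PySem.Dict.counter line.1) (PySem.Dict.counter sym.1)).size ≠ 0 ∧
     (counterAnd (PySem.Dict.counter line.2.1) (PySem.Dict.counter sym.2.1)).size ≠ 0) ↔
    condB sym.1 sym.2.1 line = true := by
  rw [condB, Bool.and_eq_true, counterAnd_size_iff, counterAnd_size_iff,
    List.any_eq_true, List.any_eq_true]
  simp only [List.contains_iff_mem]

lemma take_two_append (m : List Int) (v : Int) :
    (m ++ [v]).take 2 = if m.length + 1 ≤ 2 then m.take 2 ++ [v] else m.take 2 := by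
  rcases m with _ | ⟨a, _ | ⟨b, t⟩⟩ <;> simp

-- A's inner loop computes (number of matched parts, first two matched values)
lemma A_inner (sym : List Int × List Int × String) (parts : List (List Int × List Int × Int)) :
    ∀ m : List Int,
      parts.foldl (stepA sym) ((m.length : Int), m.take 2) =
        (((m ++ (parts.filter (condB sym.1 sym.2.1)).map (·.2.2)).length : Int),
         (m ++ (parts.filter (condB sym.1 sym.2.1)).map (·.2.2)).take 2) := by
  induction parts with
  | nil => intro m; simp [List.filter]
  | cons line rest ih =>
    intro m
    simp only [List.foldl_cons, List.filter_cons]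
    by_cases h : condB sym.1 sym.2.1 line = true
    · have hA := (cond_iff sym line).mpr h
      have hstep : stepA sym ((m.length : Int), m.take 2) line =
          (((m ++ [line.2.2]).length : Int), (m ++ [line.2.2]).take 2) := by
        simp only [stepA]
        rw [if_pos hA]
        refine Prod.ext ?_ ?_
        · simp [List.length_append]
        · simp only [take_two_append]
          split_ifs with h1 h2 <;> first | rfl | (exfalso; omega)
      rw [hstep, ih (m ++ [line.2.2]), if_pos h]
      simp
    · have hA := (cond_iff sym line).not.mpr h
      have hstep : stepA sym ((m.length : Int), m.take 2) line = ((m.length : Int), m.take 2) := by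
        simp only [stepA]; rw [if_neg hA]
      rw [hstep, if_neg h]
      exact ih m

-- ---- index characterization ----

lemma getD_cellAdd (g : PySem.Dict Int (List Int)) (x x' i : Int) :
    (cellAdd g x i).getD x' [] =
      if x' = x ∧ (g.getD x []).getLast? ≠ some i
      then g.getD x [] ++ [i] else g.getD x' [] := by
  unfold cellAdd
  by_cases h : (g.getD x []).getLast? = some i
  · rw [if_pos (beq_iff_eq.mpr h)]
    rw [if_neg (by simp [h])]
  · rw [if_neg (by simpa using h), PySem.Dict.getD_insert]
    by_cases h2 : x' = x
    · rw [if_pos h2, if_pos ⟨h2, h⟩]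
    · rw [if_neg h2, if_neg (by simp [h2])]

lemma idx_x (xs : List Int) (g : PySem.Dict Int (List Int)) (i x' : Int) :
    (xs.foldl (fun g x => cellAdd g x i) g).getD x' [] =
      if x' ∈ xs ∧ (g.getD x' []).getLast? ≠ some i
      then g.getD x' [] ++ [i] else g.getD x' [] := by
  induction xs generalizing g with
  | nil => simp
  | cons x t ih =>
    simp only [List.foldl_cons]
    rw [ih]
    by_cases hx : x' = x
    · subst hx
      by_cases hg : (g.getD x' []).getLast? = some i
      · simp [getD_cellAdd, hg]
      · simp [getD_cellAdd, hg]
    · have hgd : (cellAdd g x i).getD x' [] = g.getD x' [] := by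
        rw [getD_cellAdd, if_neg (by simp [hx])]
      rw [hgd]
      have hmem : (x' ∈ x :: t) ↔ x' ∈ t := by simp [hx]
      simp only [hmem]

lemma idx_main (parts' : List (List Int × List Int × Int)) :
    ∀ (s : Int) (g : PySem.Dict Int (List Int)),
      (∀ x j, j ∈ g.getD x [] → j < s) →
      ∀ x : Int,
      ((PySem.List.enumerate parts' s).foldl
        (fun g il => il.2.1.foldl (fun g x => cellAdd g x il.1) g) g).getD x [] =
      g.getD x [] ++
        ((PySem.List.enumerate parts' s).filter (fun il => il.2.1.contains x)).map (·.1) := by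
  induction parts' with
  | nil => intro s g H x; simp [PySem.List.enumerate]
  | cons line rest ih =>
    intro s g H x
    rw [PySem.List.enumerate_cons]
    simp only [List.foldl_cons, List.filter_cons]
    have hg' : ∀ x' : Int,
        (line.1.foldl (fun g x => cellAdd g x s) g).getD x' []
        = if x' ∈ line.1 then g.getD x' [] ++ [s] else g.getD x' [] := by
      intro x'
      rw [idx_x]
      have hlast : (g.getD x' []).getLast? ≠ some s := by
        intro h
        have hm : s ∈ g.getD x' [] := List.mem_of_getLast? h
        exact absurd (H x' s hm) (lt_irrefl s)
      by_cases hc : x' ∈ line.1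
      · rw [if_pos ⟨hc, hlast⟩, if_pos hc]
      · rw [if_neg (by tauto), if_neg hc]
    have H' : ∀ x' j, j ∈ (line.1.foldl (fun g x => cellAdd g x s) g).getD x' [] →
        j < s + 1 := by
      intro x' j hj
      rw [hg'] at hj
      split at hj
      · rcases List.mem_append.mp hj with h | h
        · exact lt_trans (H x' j h) (by omega)
        · simp at h; omega
      · exact lt_trans (H x' j hj) (by omega)
    rw [ih (s + 1) _ H' x, hg' x]
    by_cases hc : x ∈ line.1
    · have hb : ((s, line).2.1.contains x) = true := by
        simpa [List.contains_iff_mem] using hc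
      rw [if_pos hc, if_pos hb]
      simp
    · have hb : ¬ ((s, line).2.1.contains x) = true := by
        simpa [List.contains_iff_mem] using hc
      rw [if_neg hc, if_neg hb]

lemma getD_buildIdx (parts : List (List Int × List Int × Int)) (x : Int) :
    (buildIdx parts).getD x [] =
      ((PySem.List.enumerate parts).filter (fun il => il.2.1.contains x)).map (·.1) := by
  unfold buildIdx
  rw [idx_main parts 0 PySem.Dict.empty (by simp [PySem.Dict.getD_empty]) x]
  simp [PySem.Dict.getD_empty]

-- ---- candidate-set characterization ----

lemma mem_foldl_update (c : Int → List Int) (ys : List Int) (h : PySem.Set Int) (j : Int) :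
    (j ∈ ys.foldl (fun h y => PySem.Set.update h (c y)) h) ↔
      j ∈ h ∨ ∃ y ∈ ys, j ∈ c y := by
  induction ys generalizing h with
  | nil => simp
  | cons y t ih =>
    simp only [List.foldl_cons]
    rw [ih, PySem.Set.mem_update]
    constructor
    · rintro ((h1 | h1) | ⟨y', hy', hj⟩)
      · exact Or.inl h1
      · exact Or.inr ⟨y, by simp, h1⟩
      · exact Or.inr ⟨y', by simp [hy'], hj⟩
    · rintro (h1 | ⟨y', hy', hj⟩)
      · exact Or.inl (Or.inl h1)
      · rcases List.mem_cons.mp hy' with rfl | hy'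
        · exact Or.inl (Or.inr hj)
        · exact Or.inr ⟨y', hy', hj⟩

lemma nodup_foldl_update (c : Int → List Int) (ys : List Int) (h : PySem.Set Int)
    (hn : h.Nodup) : (ys.foldl (fun h y => PySem.Set.update h (c y)) h).Nodup := by
  induction ys generalizing h with
  | nil => exact hn
  | cons y t ih =>
    simp only [List.foldl_cons]
    exact ih _ (PySem.Set.nodup_update _ _ hn)

lemma map_snd_filter_enumerate {α : Type} (p : α → Bool) (xs : List α) :
    ∀ s : Int, ((PySem.List.enumerate xs s).filter (fun il => p il.2)).map (·.2)
      = xs.filter p := by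
  induction xs with
  | nil => intro s; simp [PySem.List.enumerate]
  | cons x t ih =>
    intro s
    rw [PySem.List.enumerate_cons]
    simp only [List.filter_cons]
    by_cases h : p x = true
    · rw [if_pos h, if_pos h]
      simp [ih (s + 1)]
    · rw [if_neg h, if_neg h]
      exact ih (s + 1)

lemma pairwise_lt_M (parts : List (List Int × List Int × Int)) (p : Int × (List Int × List Int × Int) → Bool) :
    (((PySem.List.enumerate parts).filter p).map (·.1)).Pairwise (· < ·) := by
  rw [List.pairwise_map]
  exact List.Pairwise.filter p (PySem.List.pairwise_lt_enumerate parts 0)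

-- cand has the same members as Mx := indices of parts sharing an x with the symbol
lemma mem_cand_iff_Mx (parts : List (List Int × List Int × Int)) (sx : List Int) (j : Int) :
    (j ∈ sx.foldl (fun c x => PySem.Set.update c ((buildIdx parts).getD x []))
        (PySem.Set.empty : PySem.Set Int)) ↔
      j ∈ ((PySem.List.enumerate parts).filter
            (fun il => il.2.1.any (fun x => sx.contains x))).map (·.1) := by
  rw [mem_foldl_update]
  simp only [PySem.Set.empty, List.not_mem_nil, false_or]
  constructor
  · rintro ⟨x, hx, hj⟩
    rw [getD_buildIdx] at hj
    rcases List.mem_map.mp hj with ⟨il, hil, rfl⟩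
    rcases List.mem_filter.mp hil with ⟨hmem, hcond⟩
    rw [List.contains_iff_mem] at hcond
    refine List.mem_map.mpr ⟨il, List.mem_filter.mpr ⟨hmem, ?_⟩, rfl⟩
    rw [List.any_eq_true]
    exact ⟨x, hcond, by rwa [List.contains_iff_mem]⟩
  · intro hj
    rcases List.mem_map.mp hj with ⟨il, hil, rfl⟩
    rcases List.mem_filter.mp hil with ⟨hmem, hcond⟩
    rw [List.any_eq_true] at hcond
    rcases hcond with ⟨x, hx1, hx2⟩
    rw [List.contains_iff_mem] at hx2
    refine ⟨x, hx2, ?_⟩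
    rw [getD_buildIdx]
    exact List.mem_map.mpr ⟨il, List.mem_filter.mpr ⟨hmem, by rwa [List.contains_iff_mem]⟩, rfl⟩

lemma nodup_cand (parts : List (List Int × List Int × Int)) (sx : List Int) :
    (sx.foldl (fun c x => PySem.Set.update c ((buildIdx parts).getD x []))
        (PySem.Set.empty : PySem.Set Int)).Nodup :=
  nodup_foldl_update _ _ _ List.nodup_nil

-- the y-verification Bool agrees with condB's y half
lemma ycond_eq (sy ys : List Int) :
    (!(PySem.Set.isdisjoint (PySem.Set.ofList sy) ys)) = ys.any (fun y => sy.contains y) := by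
  cases hb : PySem.Set.isdisjoint (PySem.Set.ofList sy) ys with
  | false =>
    simp only [Bool.not_false]
    symm
    rw [List.any_eq_true]
    have h1 : ¬ (∀ x ∈ PySem.Set.ofList sy, x ∉ ys) := by
      intro hall
      have := (PySem.Set.isdisjoint_iff (PySem.Set.ofList sy) ys).mpr hall
      rw [hb] at this
      exact Bool.false_ne_true this
    push Not at h1
    rcases h1 with ⟨x, hx, hxy⟩
    exact ⟨x, by simpa using hxy,
      by rw [List.contains_iff_mem]; exact (PySem.Set.mem_ofList sy x).mp hx⟩
  | true =>
    simp only [Bool.not_true]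
    symm
    rw [← Bool.not_eq_true, List.any_eq_true]
    have hall := (PySem.Set.isdisjoint_iff (PySem.Set.ofList sy) ys).mp hb
    rintro ⟨y, hy1, hy2⟩
    exact hall y ((PySem.Set.mem_ofList sy y).mpr (by rwa [List.contains_iff_mem] at hy2)) hy1

-- per-symbol equality of the two branch bodies
lemma persym (parts : List (List Int × List Int × Int)) (sym : List Int × List Int × String) :
    (let st := parts.foldl (stepA sym) ((0 : Int), ([] : List Int))
     if st.1 == 2 then
       [[PySem.List.pyGetD st.2 0 0, PySem.List.pyGetD st.2 1 0,
         PySem.List.pyGetD st.2 0 0 * PySem.List.pyGetD st.2 1 0]]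
     else []) =
    (let cand : PySem.Set Int :=
       sym.1.foldl (fun c x => PySem.Set.update c ((buildIdx parts).getD x []))
         PySem.Set.empty
     let syset : PySem.Set Int := PySem.Set.ofList sym.2.1
     let hits := (PySem.List.sorted cand (fun z => z) false).filter
       (fun i => !(PySem.Set.isdisjoint syset (PySem.List.pyGetD parts i ([], [], 0)).2.1))
     if (hits.length : Int) == 2 then
       let a := (PySem.List.pyGetD parts (PySem.List.pyGetD hits 0 0) ([], [], 0)).2.2
       let b := (PySem.List.pyGetD parts (PySem.List.pyGetD hits 1 0) ([], [], 0)).2.2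
       [[a, b, a * b]]
     else []) := by
  set F := (PySem.List.enumerate parts).filter (fun il => condB sym.1 sym.2.1 il.2) with hF
  set Mx := ((PySem.List.enumerate parts).filter
    (fun il => il.2.1.any (fun x => sym.1.contains x))).map (·.1) with hMx
  set cand := sym.1.foldl (fun c x => PySem.Set.update c ((buildIdx parts).getD x []))
    (PySem.Set.empty : PySem.Set Int) with hcand
  -- A's state
  have hst : parts.foldl (stepA sym) ((0 : Int), ([] : List Int)) =
      ((F.length : Int), (F.map (fun il => il.2.2.2)).take 2) := by
    have := A_inner sym parts []
    simp only [List.length_nil, Nat.cast_zero, List.take_nil, List.nil_append] at this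
    rw [this]
    have hsnd : (parts.filter (condB sym.1 sym.2.1)).map (·.2.2) =
        F.map (fun il => il.2.2.2) := by
      rw [hF, ← map_snd_filter_enumerate (condB sym.1 sym.2.1) parts 0, List.map_map]
      rfl
    rw [hsnd]
    simp
  -- pyGetD on an enumerated index
  have hget : ∀ il ∈ PySem.List.enumerate parts,
      PySem.List.pyGetD parts il.1 ([], [], 0) = il.2 := by
    intro il hmem
    rcases (PySem.List.mem_enumerate_iff parts 0 il).mp hmem with ⟨k, hk, rfl⟩
    simp only [zero_add]
    rw [PySem.List.pyGetD_natCast, List.getD_eq_getElem _ _ hk]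
  -- sorted cand = Mx
  have hperm : Mx.Perm cand := by
    refine (List.perm_ext_iff_of_nodup ?_ (nodup_cand _ _)).mpr ?_
    · exact (pairwise_lt_M parts _).imp (fun h => ne_of_lt h)
    · intro j
      exact (mem_cand_iff_Mx parts sym.1 j).symm
  have hsorted : PySem.List.sorted cand (fun z => z) false = Mx :=
    PySem.List.sorted_eq_of_perm_of_pairwise_lt cand Mx (fun z => z) hperm
      (pairwise_lt_M parts (fun il => il.2.1.any (fun x => sym.1.contains x)))
  -- hits = F.map (·.1)
  have hhits : Mx.filter
      (fun i => !(PySem.Set.isdisjoint (PySem.Set.ofList sym.2.1)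
        (PySem.List.pyGetD parts i ([], [], 0)).2.1)) = F.map (·.1) := by
    rw [hMx, List.filter_map]
    rw [List.filter_filter]
    rw [hF]
    congr 1
    apply List.filter_congr
    intro il hmem
    simp only [Function.comp_apply]
    rw [hget il hmem, ycond_eq, condB]
    rw [Bool.and_comm]
  simp only [hst, hsorted, hhits, List.length_map]
  by_cases h2 : F.length = 2
  · rcases List.length_eq_two.mp h2 with ⟨p, q, hpq⟩
    have hpF : p ∈ F := by rw [hpq]; simp
    have hqF : q ∈ F := by rw [hpq]; simp
    have hpE : p ∈ PySem.List.enumerate parts := List.mem_of_mem_filter (hF ▸ hpF)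
    have hqE : q ∈ PySem.List.enumerate parts := List.mem_of_mem_filter (hF ▸ hqF)
    have hcond : (((F.length : Int)) == 2) = true := by simp [h2]
    rw [if_pos hcond, if_pos hcond]
    simp only [hpq, List.map_cons, List.map_nil]
    have g0 : ∀ (a b : Int), PySem.List.pyGetD [a, b] (0 : Int) 0 = a := fun a b => rfl
    have g1 : ∀ (a b : Int), PySem.List.pyGetD [a, b] (1 : Int) 0 = b := fun a b => rfl
    have ht : (List.take 2 [p.2.2.2, q.2.2.2] : List Int) = [p.2.2.2, q.2.2.2] := rfl
    rw [ht, g0, g0, g1, g1, hget p hpE, hget q hqE]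
  · have hcond : ¬ (((F.length : Int)) == 2) = true := by
      simp only [beq_iff_eq]
      exact_mod_cast h2
    rw [if_neg hcond, if_neg hcond]

-- fold-shape: both outer loops append a per-symbol block
lemma findGears_eq (parts : List (List Int × List Int × Int))
    (symbols : List (List Int × List Int × String)) :
    findGears parts symbols = symbols.foldl
      (fun gL sym =>
        if sym.2.2 == "*" then
          let st := parts.foldl (stepA sym) ((0 : Int), ([] : List Int))
          if st.1 == 2 then
            gL ++ [[PySem.List.pyGetD st.2 0 0, PySem.List.pyGetD st.2 1 0,
                    PySem.List.pyGetD st.2 0 0 * PySem.List.pyGetD st.2 1 0]]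
          else gL
        else gL) [] := rfl

lemma findGears_alt_eq (parts : List (List Int × List Int × Int))
    (symbols : List (List Int × List Int × String)) :
    findGears_alt parts symbols = symbols.foldl
      (fun gears sym =>
        if sym.2.2 == "*" then
          let cand : PySem.Set Int :=
            sym.1.foldl (fun c x => PySem.Set.update c ((buildIdx parts).getD x []))
              PySem.Set.empty
          let syset : PySem.Set Int := PySem.Set.ofList sym.2.1
          let hits := (PySem.List.sorted cand (fun z => z) false).filter
            (fun i => !(PySem.Set.isdisjoint syset (PySem.List.pyGetD parts i ([], [], 0)).2.1))
          if (hits.length : Int) == 2 then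
            let a := (PySem.List.pyGetD parts (PySem.List.pyGetD hits 0 0) ([], [], 0)).2.2
            let b := (PySem.List.pyGetD parts (PySem.List.pyGetD hits 1 0) ([], [], 0)).2.2
            gears ++ [[a, b, a * b]]
          else gears
        else gears) [] := rfl

lemma findGears_eq_flatMap (parts : List (List Int × List Int × Int))
    (symbols : List (List Int × List Int × String)) :
    findGears parts symbols = symbols.flatMap (fun sym =>
      if sym.2.2 == "*" then
        (let st := parts.foldl (stepA sym) ((0 : Int), ([] : List Int))
         if st.1 == 2 then
           [[PySem.List.pyGetD st.2 0 0, PySem.List.pyGetD st.2 1 0,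
             PySem.List.pyGetD st.2 0 0 * PySem.List.pyGetD st.2 1 0]]
         else [])
      else []) := by
  suffices h : ∀ (syms : List (List Int × List Int × String)) (gL : List (List Int)),
      syms.foldl
        (fun gL sym =>
          if sym.2.2 == "*" then
            let st := parts.foldl (stepA sym) ((0 : Int), ([] : List Int))
            if st.1 == 2 then
              gL ++ [[PySem.List.pyGetD st.2 0 0, PySem.List.pyGetD st.2 1 0,
                      PySem.List.pyGetD st.2 0 0 * PySem.List.pyGetD st.2 1 0]]
            else gL
          else gL) gL
      = gL ++ syms.flatMap (fun sym =>
          if sym.2.2 == "*" then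
            (let st := parts.foldl (stepA sym) ((0 : Int), ([] : List Int))
             if st.1 == 2 then
               [[PySem.List.pyGetD st.2 0 0, PySem.List.pyGetD st.2 1 0,
                 PySem.List.pyGetD st.2 0 0 * PySem.List.pyGetD st.2 1 0]]
             else [])
          else []) by
    rw [findGears_eq]
    simpa using h symbols []
  intro syms
  induction syms with
  | nil => intro gL; simp
  | cons sym rest ih =>
    intro gL
    simp only [List.foldl_cons, List.flatMap_cons]
    rw [ih]
    by_cases h : sym.2.2 == "*"
    · rw [if_pos h, if_pos h]
      split <;> simp
    · rw [if_neg h, if_neg h]; simp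

lemma findGears_alt_eq_flatMap (parts : List (List Int × List Int × Int))
    (symbols : List (List Int × List Int × String)) :
    findGears_alt parts symbols = symbols.flatMap (fun sym =>
      if sym.2.2 == "*" then
        (let cand : PySem.Set Int :=
           sym.1.foldl (fun c x => PySem.Set.update c ((buildIdx parts).getD x []))
             PySem.Set.empty
         let syset : PySem.Set Int := PySem.Set.ofList sym.2.1
         let hits := (PySem.List.sorted cand (fun z => z) false).filter
           (fun i => !(PySem.Set.isdisjoint syset (PySem.List.pyGetD parts i ([], [], 0)).2.1))
         if (hits.length : Int) == 2 then
           let a := (PySem.List.pyGetD parts (PySem.List.pyGetD hits 0 0) ([], [], 0)).2.2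
           let b := (PySem.List.pyGetD parts (PySem.List.pyGetD hits 1 0) ([], [], 0)).2.2
           [[a, b, a * b]]
         else [])
      else []) := by
  suffices h : ∀ (syms : List (List Int × List Int × String)) (gL : List (List Int)),
      syms.foldl
        (fun gears sym =>
          if sym.2.2 == "*" then
            let cand : PySem.Set Int :=
              sym.1.foldl (fun c x => PySem.Set.update c ((buildIdx parts).getD x []))
                PySem.Set.empty
            let syset : PySem.Set Int := PySem.Set.ofList sym.2.1
            let hits := (PySem.List.sorted cand (fun z => z) false).filter
              (fun i => !(PySem.Set.isdisjoint syset (PySem.List.pyGetD parts i ([], [], 0)).2.1))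
            if (hits.length : Int) == 2 then
              let a := (PySem.List.pyGetD parts (PySem.List.pyGetD hits 0 0) ([], [], 0)).2.2
              let b := (PySem.List.pyGetD parts (PySem.List.pyGetD hits 1 0) ([], [], 0)).2.2
              gears ++ [[a, b, a * b]]
            else gears
          else gears) gL
      = gL ++ syms.flatMap (fun sym =>
          if sym.2.2 == "*" then
            (let cand : PySem.Set Int :=
               sym.1.foldl (fun c x => PySem.Set.update c ((buildIdx parts).getD x []))
                 PySem.Set.empty
             let syset : PySem.Set Int := PySem.Set.ofList sym.2.1
             let hits := (PySem.List.sorted cand (fun z => z) false).filter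
               (fun i => !(PySem.Set.isdisjoint syset (PySem.List.pyGetD parts i ([], [], 0)).2.1))
             if (hits.length : Int) == 2 then
               let a := (PySem.List.pyGetD parts (PySem.List.pyGetD hits 0 0) ([], [], 0)).2.2
               let b := (PySem.List.pyGetD parts (PySem.List.pyGetD hits 1 0) ([], [], 0)).2.2
               [[a, b, a * b]]
             else [])
          else []) by
    rw [findGears_alt_eq]
    simpa using h symbols []
  intro syms
  induction syms with
  | nil => intro gL; simp
  | cons sym rest ih =>
    intro gL
    simp only [List.foldl_cons, List.flatMap_cons]
    rw [ih]
    by_cases h : sym.2.2 == "*"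
    · rw [if_pos h, if_pos h]
      split <;> simp
    · rw [if_neg h, if_neg h]; simp

lemma main_eq (parts : List (List Int × List Int × Int))
    (symbols : List (List Int × List Int × String)) :
    findGears parts symbols = findGears_alt parts symbols := by
  rw [findGears_eq_flatMap, findGears_alt_eq_flatMap]
  congr 1
  funext sym
  by_cases h : sym.2.2 == "*"
  · rw [if_pos h, if_pos h]; exact persym parts sym
  · rw [if_neg h, if_neg h]

-- ===== VERDICT (by name: the statement is the Claim_ definition above) =====
theorem findGears_spec : Claim_equal_findGears := by
  intro parts symbols _
  unfold Spec_findGears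
  exact main_eq parts symbols
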